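-- pv_equiv track=rewrite | github.com/NRAfnan/CSE220 | Practice/Recursion/A17.py | parenBit
-- ===== SOURCE A (Python) =====
-- def parenBit(given, i=0, got_left_paren=False):
--     if i >= len(given):
--         return ""
--
--     if given[i] == "(":
--         return given[i] + parenBit(given, i + 1, True)
--     if given[i] == ")":
--         return given[i]
--     if got_left_paren:
--         return given[i] + parenBit(given, i + 1, True)
--
--     return parenBit(given, i + 1)
-- ===== SOURCE B (Python) =====
-- def parenBit(given, i=0, got_left_paren=False):
--     n = len(given)
--     if not got_left_paren:
--         # phase 1: skip characters until the first parenthesis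
--         while i < n and given[i] not in "()":
--             i += 1
--         if i >= n:
--             return ""
--         if given[i] == ")":
--             return ")"
--         # '(' found: collect from here
--     # phase 2: collect characters up to and including the first ')'
--     out = []
--     while i < n:
--         out.append(given[i])
--         if given[i] == ")":
--             break
--         i += 1
--     return "".join(out)
-- ===== Notes on version B (the rewrite author's own statement) =====
-- stated objective: alternative
-- what changed: Replaced A's single recursive four-way case analysis (building the result by per-step string concatenation) with a staged two-phase iteration: a skip loop that advances past non-parenthesis characters, then a collect loop with an accumulator that gathers characters up to and including the first ')'.
import Mathlib
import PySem

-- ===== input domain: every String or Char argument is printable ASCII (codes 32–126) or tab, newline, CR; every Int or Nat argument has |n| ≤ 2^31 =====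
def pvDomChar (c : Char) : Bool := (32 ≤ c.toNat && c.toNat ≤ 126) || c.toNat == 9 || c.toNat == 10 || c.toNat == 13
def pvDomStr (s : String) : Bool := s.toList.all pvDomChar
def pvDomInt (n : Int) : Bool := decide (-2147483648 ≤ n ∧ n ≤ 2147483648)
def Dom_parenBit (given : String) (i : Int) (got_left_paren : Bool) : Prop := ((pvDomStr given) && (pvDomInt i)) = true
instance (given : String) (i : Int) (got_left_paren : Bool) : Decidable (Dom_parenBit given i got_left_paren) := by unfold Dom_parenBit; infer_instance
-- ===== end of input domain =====

-- B replaces A's single recursive case analysis by a staged two-phase iteration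
-- (skip until the first parenthesis, then collect into an accumulator up to ')').

-- ===== PORT A =====
-- A's recursion, on the string's character list (given[i] = pyGet?; IndexError,
-- i.e. none with i < len, is excluded by Pre_ and mapped to "").
def parenBitCoreA (L : List Char) (i : Int) (got_left_paren : Bool) : List Char :=
  if (L.length : Int) ≤ i then []
  else
    match PySem.List.pyGet? L i with
    | none => []  -- IndexError in Python (i < -len); outside Pre_
    | some c =>
      if c = '(' then c :: parenBitCoreA L (i + 1) true
      else if c = ')' then [c]
      else if got_left_paren then c :: parenBitCoreA L (i + 1) true
      else parenBitCoreA L (i + 1) false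
termination_by ((L.length : Int) - i).toNat
decreasing_by all_goals omega

def parenBit (given : String) (i : Int) (got_left_paren : Bool) : String :=
  String.mk (parenBitCoreA given.toList i got_left_paren)

-- ===== PORT B =====
-- B's phase 2: collect characters up to and including the first ')' (accumulator,
-- kept reversed, joined at exit).
def parenBitCollect (L : List Char) (i : Int) (out : List Char) : String :=
  if i < (L.length : Int) then
    match PySem.List.pyGet? L i with
    | none => String.mk out.reverse  -- IndexError in Python (i < -len); outside Pre_
    | some c =>
      if c = ')' then String.mk (c :: out).reverse
      else parenBitCollect L (i + 1) (c :: out)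
  else String.mk out.reverse
termination_by ((L.length : Int) - i).toNat
decreasing_by all_goals omega

-- B's phase 1: skip characters until the first parenthesis.
def parenBitSkip (L : List Char) (i : Int) : String :=
  if i < (L.length : Int) then
    match PySem.List.pyGet? L i with
    | none => ""  -- IndexError in Python (i < -len); outside Pre_
    | some c =>
      if c = '(' then parenBitCollect L i []
      else if c = ')' then ")"
      else parenBitSkip L (i + 1)
  else ""
termination_by ((L.length : Int) - i).toNat
decreasing_by all_goals omega

def parenBit_alt (given : String) (i : Int) (got_left_paren : Bool) : String :=
  if got_left_paren then parenBitCollect given.toList i []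
  else parenBitSkip given.toList i

-- ===== PRECONDITION & SPEC =====
-- Pre_ excludes exactly the inputs where Python A raises IndexError: i < -len(given).
def Pre_parenBit (given : String) (i : Int) (got_left_paren : Bool) : Prop :=
  -(given.toList.length : Int) ≤ i
instance (given : String) (i : Int) (got_left_paren : Bool) : Decidable (Pre_parenBit given i got_left_paren) := by unfold Pre_parenBit; infer_instance
def pvWitness_parenBit : String × Int × Bool := ("a(bc)d", 0, false)

def Spec_parenBit (given : String) (i : Int) (got_left_paren : Bool) (out : String) : Prop := out = parenBit_alt given i got_left_paren
instance (given : String) (i : Int) (got_left_paren : Bool) (out : String) : Decidable (Spec_parenBit given i got_left_paren out) := by unfold Spec_parenBit; infer_instance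

-- ===== CLAIM (what is proved, stated in full; the proofs are below) =====
def Claim_equal_parenBit : Prop := ∀ (given : String) (i : Int) (got_left_paren : Bool), Dom_parenBit given i got_left_paren → Pre_parenBit given i got_left_paren → Spec_parenBit given i got_left_paren (parenBit given i got_left_paren)

-- ===== LEMMAS AND PROOFS =====

-- Phase 2 with accumulator `out` equals A's recursion with the flag set.
theorem collect_eq_coreA (L : List Char) (i : Int) (out : List Char) :
    parenBitCollect L i out = String.mk (out.reverse ++ parenBitCoreA L i true) := by
  fun_induction parenBitCollect L i out
  all_goals rw [parenBitCoreA]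
  all_goals simp_all
  all_goals (try rw [if_neg (by omega)])
  all_goals (try (split_ifs <;> simp_all))

-- Phase 1 equals A's recursion with the flag cleared.
theorem skip_eq_coreA (L : List Char) (i : Int) :
    parenBitSkip L i = String.mk (parenBitCoreA L i false) := by
  fun_induction parenBitSkip L i
  all_goals rw [parenBitCoreA]
  all_goals simp_all [collect_eq_coreA]
  all_goals (try rw [if_neg (by omega)])
  all_goals (try rfl)
  all_goals (try (rw [parenBitCoreA, if_neg (by omega)]; simp_all))

-- ===== VERDICT (by name: the statement is the Claim_ definition above) =====
theorem parenBit_spec : Claim_equal_parenBit := by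
  intro given i glp _ _
  unfold Spec_parenBit parenBit parenBit_alt
  cases glp <;> simp [collect_eq_coreA, skip_eq_coreA]
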